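-- pv_equiv track=rewrite | github.com/matheusg40/dashTi | utils.py | get_etapas
-- ===== SOURCE A (Python) =====
-- ETAPAS_PROJETO = [
--     "Levantamento de requisitos",
--     "Aprovação do escopo",
--     "Desenvolvimento / Execução",
--     "Testes e validação",
--     "Homologação com cliente",
--     "Documentação",
--     "Deploy / Entrega",
--     "Encerramento e lições aprendidas",
-- ]
--
-- def get_etapas(row):
--     val = str(row.get("Etapas", ""))
--     if val and val != "nan":
--         bits   = val.split(",")
--         result = [b.strip() == "1" for b in bits]
--         while len(result) < len(ETAPAS_PROJETO):
--             result.append(False)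
--         return result[:len(ETAPAS_PROJETO)]
--     return [False] * len(ETAPAS_PROJETO)
-- ===== SOURCE B (Python) =====
-- ETAPAS_PROJETO = [
--     "Levantamento de requisitos",
--     "Aprovação do escopo",
--     "Desenvolvimento / Execução",
--     "Testes e validação",
--     "Homologação com cliente",
--     "Documentação",
--     "Deploy / Entrega",
--     "Encerramento e lições aprendidas",
-- ]
--
-- def get_etapas(row):
--     val = str(row.get("Etapas", ""))
--     if not val or val == "nan":
--         return [False] * len(ETAPAS_PROJETO)
--     # single-pass DFA over the characters: no split/strip/intermediate token list.
--     # state 0: only whitespace seen in current token; 1: token is ws* '1' ws*; 2: token cannot match "1"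
--     out = []
--     state = 0
--     for c in val:
--         if c == ",":
--             out.append(state == 1)
--             state = 0
--         elif c.isspace():
--             pass
--         elif c == "1" and state == 0:
--             state = 1
--         else:
--             state = 2
--     out.append(state == 1)
--     return (out + [False] * len(ETAPAS_PROJETO))[:len(ETAPAS_PROJETO)]
-- ===== Notes on version B (the rewrite author's own statement) =====
-- stated objective: alternative
-- what changed: A splits on commas into substrings, strips each and compares to '1', then pads with a while loop and slices; B is a single character-level DFA pass that never materialises tokens: it scans the string once with a 3-valued state (all-whitespace / matches ws*'1'ws* / dead), emitting one boolean per comma, then pads/truncates arithmetically.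
import Mathlib
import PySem

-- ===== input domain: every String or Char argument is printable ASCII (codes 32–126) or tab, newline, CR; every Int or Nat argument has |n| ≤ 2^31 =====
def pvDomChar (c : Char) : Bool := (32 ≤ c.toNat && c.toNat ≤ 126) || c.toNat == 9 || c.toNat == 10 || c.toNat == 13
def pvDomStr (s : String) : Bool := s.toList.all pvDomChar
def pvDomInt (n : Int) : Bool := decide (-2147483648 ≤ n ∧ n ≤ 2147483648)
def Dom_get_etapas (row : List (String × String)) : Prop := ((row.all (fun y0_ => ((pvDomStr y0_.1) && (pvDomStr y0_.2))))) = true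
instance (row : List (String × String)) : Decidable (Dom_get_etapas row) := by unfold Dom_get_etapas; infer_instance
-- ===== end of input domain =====

-- B replaces A's split/strip/pad/slice pipeline with one character-level DFA pass that never
-- materialises the token substrings (objective: alternative).

-- ===== PORT A =====
-- the while-loop `while len(result) < 8: result.append(False)`
def padA (r : List Bool) : List Bool :=
  if r.length < 8 then padA (r ++ [false]) else r
termination_by 8 - r.length
decreasing_by simp; omega

def get_etapas (row : List (String × String)) : List Bool :=
  let val := PySem.Dict.getD (PySem.Dict.ofList row) "Etapas" ""
  if val ≠ "" ∧ val ≠ "nan" then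
    let bits := (PySem.Str.split? val ",").getD []
    let result := bits.map (fun b => PySem.Str.strip b == "1")
    PySem.List.slice (padA result) none (some 8)
  else
    List.replicate 8 false

-- ===== PORT B =====
-- one step of Source B's loop body; state 0: only whitespace seen, 1: token is ws* '1' ws*, 2: dead
def bStep (p : List Bool × Int) (c : Char) : List Bool × Int :=
  if c = ',' then (p.1 ++ [decide (p.2 = 1)], 0)
  else if PySem.Chars.isspace c then p
  else if c = '1' ∧ p.2 = 0 then (p.1, 1)
  else (p.1, 2)

def get_etapas_alt (row : List (String × String)) : List Bool :=
  let val := PySem.Dict.getD (PySem.Dict.ofList row) "Etapas" ""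
  if val = "" ∨ val = "nan" then
    List.replicate 8 false
  else
    let p := val.toList.foldl bStep ([], 0)
    ((p.1 ++ [decide (p.2 = 1)]) ++ List.replicate 8 false).take 8

-- ===== PRECONDITION & SPEC =====
def Spec_get_etapas (row : List (String × String)) (out : List Bool) : Prop := out = get_etapas_alt row
instance (row : List (String × String)) (out : List Bool) : Decidable (Spec_get_etapas row out) := by unfold Spec_get_etapas; infer_instance

-- ===== CLAIM (what is proved, stated in full; the proofs are below) =====
def Claim_equal_get_etapas : Prop := ∀ (row : List (String × String)), Dom_get_etapas row → Spec_get_etapas row (get_etapas row)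

-- ===== LEMMAS AND PROOFS =====

-- tokenisation of a char list at commas (proof-side model of val.split(","))
def toks : List Char → List (List Char)
  | [] => [[]]
  | c :: cs => if c = ',' then [] :: toks cs else (c :: (toks cs).headI) :: (toks cs).tail

-- non-comma step of the DFA
def tstep (s : Int) (c : Char) : Int :=
  if PySem.Chars.isspace c then s
  else if c = '1' ∧ s = 0 then 1 else 2

def flagT (s : Int) (t : List Char) : Int := t.foldl tstep s

theorem toks_ne_nil (cs : List Char) : toks cs ≠ [] := by
  cases cs with
  | nil => simp [toks]
  | cons c cs => simp only [toks]; split <;> simp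

theorem toks_cons_self (cs : List Char) : (toks cs).headI :: (toks cs).tail = toks cs := by
  cases h : toks cs with
  | nil => exact absurd h (toks_ne_nil cs)
  | cons a l => simp

theorem toks_comma (cs : List Char) : toks (',' :: cs) = [] :: toks cs := by
  simp [toks]

theorem toks_cons (c : Char) (cs : List Char) (hc : c ≠ ',') :
    toks (c :: cs) = (c :: (toks cs).headI) :: (toks cs).tail := by
  simp [toks, hc]

theorem go_spec : ∀ (fuel : Nat) (l cur : List Char) (acc : List (List Char)),
    l.length ≤ fuel →
    PySem.Chars.splitOn.go [','] fuel l cur acc =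
      acc.reverse ++ (cur.reverse ++ (toks l).headI) :: (toks l).tail := by
  intro fuel
  induction fuel with
  | zero =>
    intro l cur acc h
    have : l = [] := by cases l <;> simp_all
    subst this
    simp [PySem.Chars.splitOn.go, toks]
  | succ f ih =>
    intro l cur acc h
    cases l with
    | nil => simp [PySem.Chars.splitOn.go, toks]
    | cons c rest =>
      by_cases hc : c = ','
      · subst hc
        have hpre : List.isPrefixOf [','] (',' :: rest) = true := by simp [List.isPrefixOf]
        rw [PySem.Chars.splitOn.go, if_pos hpre]
        simp only [List.length_singleton, List.drop_one, List.tail_cons]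
        rw [ih rest [] (cur.reverse :: acc) (by simp at h; omega)]
        simp [toks, toks_cons_self]
      · have hpre : List.isPrefixOf [','] (c :: rest) = false := by
          simp [List.isPrefixOf]; exact fun hh => (hc hh.symm).elim
        rw [PySem.Chars.splitOn.go, if_neg (by simp [hpre])]
        rw [ih rest (c :: cur) acc (by simp at h; omega)]
        simp [toks, hc]

theorem splitOn_eq_toks (cs : List Char) : PySem.Chars.splitOn cs [','] = toks cs := by
  rw [PySem.Chars.splitOn, go_spec (cs.length + 1) cs [] [] (by omega)]
  simp [toks_cons_self]

-- emitted booleans / final state of Source B's loop, split off from the fold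
def outsB (s : Int) : List Char → List Bool
  | [] => []
  | c :: cs => if c = ',' then decide (s = 1) :: outsB 0 cs else outsB (tstep s c) cs

def finB (s : Int) : List Char → Int
  | [] => s
  | c :: cs => if c = ',' then finB 0 cs else finB (tstep s c) cs

theorem outsB_comma (s : Int) (cs : List Char) :
    outsB s (',' :: cs) = decide (s = 1) :: outsB 0 cs := by simp [outsB]

theorem outsB_cons (s : Int) (c : Char) (cs : List Char) (hc : c ≠ ',') :
    outsB s (c :: cs) = outsB (tstep s c) cs := by simp [outsB, hc]

theorem finB_comma (s : Int) (cs : List Char) : finB s (',' :: cs) = finB 0 cs := by simp [finB]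

theorem finB_cons (s : Int) (c : Char) (cs : List Char) (hc : c ≠ ',') :
    finB s (c :: cs) = finB (tstep s c) cs := by simp [finB, hc]

theorem fold_eq (cs : List Char) : ∀ (acc : List Bool) (s : Int),
    cs.foldl bStep (acc, s) = (acc ++ outsB s cs, finB s cs) := by
  induction cs with
  | nil => intro acc s; simp [outsB, finB]
  | cons c cs ih =>
    intro acc s
    by_cases hc : c = ','
    · subst hc
      simp only [List.foldl_cons, bStep, if_pos rfl, outsB_comma, finB_comma]
      rw [ih]; simp
    · simp only [List.foldl_cons, outsB_cons s c cs hc, finB_cons s c cs hc]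
      have hb : bStep (acc, s) c = (acc, tstep s c) := by
        simp only [bStep, tstep, if_neg hc]
        split_ifs <;> rfl
      rw [hb, ih]

theorem outs_fin (cs : List Char) : ∀ (s : Int),
    outsB s cs ++ [decide (finB s cs = 1)] =
      decide (flagT s (toks cs).headI = 1) ::
        (toks cs).tail.map (fun t => decide (flagT 0 t = 1)) := by
  induction cs with
  | nil => intro s; simp [outsB, finB, toks, flagT]
  | cons c cs ih =>
    intro s
    by_cases hc : c = ','
    · subst hc
      rw [outsB_comma, finB_comma, toks_comma, List.cons_append, ih 0]
      simp only [List.headI_cons, List.tail_cons, flagT, List.foldl_nil]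
      rw [← toks_cons_self cs]
      simp
    · rw [outsB_cons s c cs hc, finB_cons s c cs hc, toks_cons c cs hc, ih (tstep s c)]
      simp [flagT]

-- strip facts needed for the DFA characterisation
theorem strip_cons_space (c : Char) (t : List Char) (h : PySem.Chars.isspace c = true) :
    PySem.Chars.strip (c :: t) = PySem.Chars.strip t := by
  simp [PySem.Chars.strip, PySem.Chars.lstrip, h]

theorem rstrip_eq_nil_iff (t : List Char) :
    PySem.Chars.rstrip t = [] ↔ t.all PySem.Chars.isspace = true := by
  simp [PySem.Chars.rstrip, List.dropWhile_eq_nil_iff, List.all_eq_true]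

theorem strip_cons_not_space_all (c : Char) (t : List Char)
    (hc : PySem.Chars.isspace c = false) (ht : t.all PySem.Chars.isspace = true) :
    PySem.Chars.strip (c :: t) = [c] := by
  have h1 : PySem.Chars.lstrip (c :: t) = c :: t := by
    simp [PySem.Chars.lstrip, hc]
  have h2 : List.dropWhile PySem.Chars.isspace t.reverse = [] := by
    rw [List.dropWhile_eq_nil_iff]
    intro x hx; simp [List.all_eq_true] at ht; exact ht x (by simpa using hx)
  simp [PySem.Chars.strip, h1, PySem.Chars.rstrip, List.reverse_cons, List.dropWhile_append, h2, hc]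

theorem strip_cons_not_space_not_all (c : Char) (t : List Char)
    (hc : PySem.Chars.isspace c = false) (ht : ¬ t.all PySem.Chars.isspace = true) :
    PySem.Chars.strip (c :: t) = c :: PySem.Chars.rstrip t ∧ PySem.Chars.rstrip t ≠ [] := by
  have hne : PySem.Chars.rstrip t ≠ [] := fun h => ht ((rstrip_eq_nil_iff t).mp h)
  have h2 : List.dropWhile PySem.Chars.isspace t.reverse ≠ [] := by
    intro h; exact hne (by simp [PySem.Chars.rstrip, h])
  have h1 : PySem.Chars.lstrip (c :: t) = c :: t := by
    simp [PySem.Chars.lstrip, hc]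
  constructor
  · simp [PySem.Chars.strip, h1, PySem.Chars.rstrip, List.reverse_cons, List.dropWhile_append,
      List.isEmpty_iff, h2]
  · exact hne

theorem one_not_space : PySem.Chars.isspace '1' = false := by decide

theorem flag_char (t : List Char) :
    (flagT 0 t = if t.all PySem.Chars.isspace then 0
                 else if PySem.Chars.strip t = ['1'] then 1 else 2)
    ∧ (flagT 1 t = if t.all PySem.Chars.isspace then 1 else 2)
    ∧ (flagT 2 t = 2) := by
  induction t with
  | nil => simp [flagT]
  | cons c t ih =>
    obtain ⟨ih0, ih1, ih2⟩ := ih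
    have hstep2 : tstep 2 c = 2 := by simp [tstep]
    by_cases hsp : PySem.Chars.isspace c = true
    · have hst : ∀ s, tstep s c = s := by intro s; simp [tstep, hsp]
      refine ⟨?_, ?_, ?_⟩
      · show flagT (tstep 0 c) t = _
        rw [hst, ih0, strip_cons_space c t hsp]
        simp [hsp]
      · show flagT (tstep 1 c) t = _
        rw [hst, ih1]; simp [hsp]
      · show flagT (tstep 2 c) t = _
        rw [hst, ih2]
    · have hspf : PySem.Chars.isspace c = false := by simp [hsp]
      have hall : (c :: t).all PySem.Chars.isspace = false := by simp [hspf]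
      by_cases h1 : c = '1'
      · subst h1
        have hst0 : tstep 0 '1' = 1 := by simp [tstep, hsp]
        refine ⟨?_, ?_, ?_⟩
        · show flagT (tstep 0 '1') t = _
          rw [hst0, ih1]
          by_cases ht : t.all PySem.Chars.isspace = true
          · rw [strip_cons_not_space_all '1' t one_not_space ht]
            simp [hall, ht]
          · obtain ⟨hs, hne⟩ := strip_cons_not_space_not_all '1' t one_not_space ht
            rw [hs]
            simp only [hall, Bool.false_eq_true, if_false, ht]
            rw [if_neg (by simp [hne])]
        · show flagT (tstep 1 '1') t = _
          have : tstep 1 '1' = 2 := by simp [tstep, hsp]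
          rw [this, ih2]; simp [hall]
        · show flagT (tstep 2 '1') t = _
          rw [hstep2, ih2]
      · have hst : ∀ s, tstep s c = 2 := by intro s; simp [tstep, hsp, h1]
        have hhead : ∀ r, PySem.Chars.strip (c :: t) = c :: r → PySem.Chars.strip (c :: t) ≠ ['1'] := by
          intro r hr he; rw [hr] at he
          exact h1 (by injection he)
        refine ⟨?_, ?_, ?_⟩
        · show flagT (tstep 0 c) t = _
          rw [hst, ih2]
          by_cases ht : t.all PySem.Chars.isspace = true
          · rw [if_neg (by simp [hall])]
            rw [strip_cons_not_space_all c t hspf ht]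
            rw [if_neg (by intro he; exact h1 (by injection he))]
          · obtain ⟨hs, _⟩ := strip_cons_not_space_not_all c t hspf ht
            rw [if_neg (by simp [hall]), if_neg (hhead _ hs)]
        · show flagT (tstep 1 c) t = _
          rw [hst, ih2]; simp [hall]
        · show flagT (tstep 2 c) t = _
          rw [hst, ih2]

theorem strip_all_space (t : List Char) (h : t.all PySem.Chars.isspace = true) :
    PySem.Chars.strip t = [] := by
  simp only [PySem.Chars.strip]
  rw [rstrip_eq_nil_iff]
  simp only [PySem.Chars.lstrip]
  rw [List.all_eq_true] at h ⊢
  intro x hx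
  exact h x (List.dropWhile_subset _ hx)

theorem accept_eq (t : List Char) :
    decide (flagT 0 t = 1) = (PySem.Chars.strip t == ['1']) := by
  have h := (flag_char t).1
  by_cases ht : t.all PySem.Chars.isspace = true
  · rw [h, if_pos ht, strip_all_space t ht]; simp
  · rw [h, if_neg ht]
    by_cases hs : PySem.Chars.strip t = ['1'] <;> simp [hs]

theorem beq_toList (s t : String) : (s == t) = (s.toList == t.toList) := by
  by_cases h : s = t
  · simp [h]
  · have : s.toList ≠ t.toList := fun he => h (String.toList_inj.mp he)
    simp [h, this]

theorem take8_pad (r : List Bool) (h : r.length ≤ 8) :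
    (r ++ List.replicate 8 false).take 8 = r ++ List.replicate (8 - r.length) false := by
  rw [List.take_append]
  congr 1
  · exact List.take_of_length_le h
  · rw [List.take_replicate]
    congr 1
    omega

theorem padA_take (r : List Bool) : (padA r).take 8 = (r ++ List.replicate 8 false).take 8 := by
  by_cases h : r.length < 8
  · have key : ∀ n (r : List Bool), r.length + n = 8 → padA r = r ++ List.replicate n false := by
      intro n
      induction n with
      | zero => intro r hr; rw [padA, if_neg (by omega)]; simp
      | succ k ih =>
        intro r hr
        rw [padA, if_pos (by omega)]
        rw [ih (r ++ [false]) (by simp; omega)]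
        simp [List.replicate_succ]
    rw [key (8 - r.length) r (by omega), take8_pad r (by omega),
      List.take_of_length_le (by simp; omega)]
  · have h1 : padA r = r := by rw [padA, if_neg h]
    rw [h1, List.take_append_of_le_length (by omega)]

-- the two loop bodies compute the same boolean list before padding
theorem core_eq (val : String) :
    ((PySem.Str.split? val ",").getD []).map (fun b => PySem.Str.strip b == "1") =
      (val.toList.foldl bStep ([], 0)).1 ++ [decide ((val.toList.foldl bStep ([], 0)).2 = 1)] := by
  have hsplit := PySem.Str.split?_map val ","
  have hc : PySem.Chars.split? val.toList ",".toList = some (toks val.toList) := by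
    rw [show (",".toList) = [','] from rfl]
    simp [PySem.Chars.split?, splitOn_eq_toks]
  rw [hc] at hsplit
  cases hb : PySem.Str.split? val "," with
  | none => rw [hb] at hsplit; simp at hsplit
  | some bits =>
    rw [hb] at hsplit
    simp only [Option.map_some, Option.some.injEq] at hsplit
    simp only [Option.getD_some]
    rw [fold_eq val.toList [] 0]
    simp only [List.nil_append]
    rw [outs_fin val.toList 0, ← toks_cons_self val.toList, ← hsplit]
    cases bits with
    | nil => simp at hsplit; exact absurd hsplit (toks_ne_nil _)
    | cons b bs =>
      simp only [List.map_cons, List.headI_cons, List.tail_cons, List.map_map, List.cons.injEq]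
      constructor
      · rw [beq_toList, PySem.Str.toList_strip,
          show ("1" : String).toList = ['1'] from rfl]
        exact (accept_eq b.toList).symm
      · apply List.map_congr_left
        intro x _
        simp only [Function.comp_apply]
        rw [beq_toList, PySem.Str.toList_strip,
          show ("1" : String).toList = ['1'] from rfl]
        exact (accept_eq x.toList).symm

-- ===== VERDICT (by name: the statement is the Claim_ definition above) =====
theorem get_etapas_spec : Claim_equal_get_etapas := by
  intro row _
  unfold Spec_get_etapas get_etapas get_etapas_alt
  set val := PySem.Dict.getD (PySem.Dict.ofList row) "Etapas" "" with hval
  by_cases h1 : val = ""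
  · simp [h1]
  · by_cases h2 : val = "nan"
    · simp [h2]
    · simp only [h1, h2, ne_eq, not_false_iff, and_self, if_true, or_self, if_false]
      rw [PySem.List.slice_to _ (by omega)]
      have h8 : ((8 : Int)).toNat = 8 := by rfl
      rw [h8, padA_take, core_eq]
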